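-- pv_equiv track=rewrite | github.com/Laincetta/mospolytech-cryptography | lab4_vertical.py | get_key_order
-- ===== SOURCE A (Python) =====
-- def get_key_order(key):
--     """Преобразует ключ в последовательность приоритетов (длина ключа = ширина)"""
--     key = key.upper().replace(' ', '')
--     key_list = list(key)
--     # Создаем пары (символ, исходный индекс) и сортируем их по алфавиту
--     indexed = [(key_list[i], i) for i in range(len(key_list))]
--     sorted_chars = sorted(indexed)
--
--     # Массив порядка: какое место занимает i-й столбец при чтении
--     order = [0] * len(key_list)
--     for priority, (char, original_idx) in enumerate(sorted_chars):
--         order[original_idx] = priority + 1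
--     return order
-- ===== SOURCE B (Python) =====
-- def get_key_order(key):
--     """Преобразует ключ в последовательность приоритетов (длина ключа = ширина)"""
--     key = key.upper().replace(' ', '')
--     return [1 + sum(1 for j, d in enumerate(key) if d < c or (d == c and j < i))
--             for i, c in enumerate(key)]
-- ===== Notes on version B (the rewrite author's own statement) =====
-- stated objective: alternative
-- what changed: Replaces the sort-then-scatter (build (char,index) pairs, stable-sort them, write priority+1 back by original index) with a direct comparison-counting rank: each position's priority is 1 + the number of positions whose (char,index) pair is lexicographically smaller; no sort and no mutable output array.
import Mathlib
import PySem

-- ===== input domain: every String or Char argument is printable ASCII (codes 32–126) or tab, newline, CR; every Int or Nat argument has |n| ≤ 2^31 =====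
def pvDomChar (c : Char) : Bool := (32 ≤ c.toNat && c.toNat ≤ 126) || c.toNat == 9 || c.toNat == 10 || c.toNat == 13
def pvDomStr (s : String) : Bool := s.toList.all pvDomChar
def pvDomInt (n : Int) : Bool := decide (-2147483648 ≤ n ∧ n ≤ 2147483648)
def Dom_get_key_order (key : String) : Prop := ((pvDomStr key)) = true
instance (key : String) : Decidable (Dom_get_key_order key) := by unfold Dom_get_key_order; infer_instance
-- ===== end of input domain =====

-- B replaces A's sort-then-scatter by a direct comparison-counting rank (no sort, no mutable
-- array): priority of position i = 1 + number of positions with a lexicographically smaller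
-- (char, index) pair.  Objective: alternative (same results, genuinely different algorithm).

-- ===== PORT A =====
def get_key_order (key : String) : List Int :=
  let key2 := PySem.Str.replace (PySem.Str.upper key) " " ""
  let key_list := key2.toList
  let indexed := (PySem.List.pyRange 0 (PySem.List.len key_list)).map
      (fun i => (PySem.List.pyGetD key_list i default, i))
  let sorted_chars := PySem.List.sorted2 indexed (fun p => p.1) (fun p => p.2)
  let order := List.replicate key_list.length (0 : Int)
  (PySem.List.enumerate sorted_chars).foldl
    (fun acc p => PySem.List.pySetD acc p.2.2 (p.1 + 1)) order

-- ===== PORT B =====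
def get_key_order_alt (key : String) : List Int :=
  let key2 := PySem.Str.replace (PySem.Str.upper key) " " ""
  let cs := key2.toList
  (PySem.List.enumerate cs).map (fun ic =>
    (1 : Int) + ((PySem.List.enumerate cs).countP (fun jd =>
      decide (jd.2 < ic.2) || (jd.2 == ic.2 && decide (jd.1 < ic.1)))))

-- ===== PRECONDITION & SPEC =====
def Spec_get_key_order (key : String) (out : List Int) : Prop := out = get_key_order_alt key
instance (key : String) (out : List Int) : Decidable (Spec_get_key_order key out) := by unfold Spec_get_key_order; infer_instance

-- ===== CLAIM (what is proved, stated in full; the proofs are below) =====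
def Claim_equal_get_key_order : Prop := ∀ (key : String), Dom_get_key_order key → Spec_get_key_order key (get_key_order key)

-- ===== LEMMAS AND PROOFS =====

-- the Boolean comparison sorted2 sorts by (Python's tuple '<' on (char, index))
def pvLt (a b : Char × Int) : Bool :=
  decide (a.1 < b.1) || (!decide (b.1 < a.1) && decide (a.2 < b.2))

theorem pvLt_irrefl (a : Char × Int) : pvLt a a = false := by
  simp [pvLt]

theorem pvLt_iff (a b : Char × Int) :
    pvLt a b = true ↔ a.1 < b.1 ∨ (¬ b.1 < a.1 ∧ a.2 < b.2) := by
  simp [pvLt]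

theorem pvLt_trans {a b c : Char × Int} (h1 : pvLt a b = true) (h2 : pvLt b c = true) :
    pvLt a c = true := by
  rw [pvLt_iff] at h1 h2 ⊢
  rcases h1 with h1 | ⟨h1a, h1b⟩ <;> rcases h2 with h2 | ⟨h2a, h2b⟩
  · exact Or.inl (lt_trans h1 h2)
  · exact Or.inl (lt_of_lt_of_le h1 (not_lt.mp h2a))
  · exact Or.inl (lt_of_le_of_lt (not_lt.mp h1a) h2)
  · refine Or.inr ⟨?_, lt_trans h1b h2b⟩
    intro hca
    exact h2a (lt_of_lt_of_le hca (not_lt.mp h1a))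

theorem pvLt_asymm {a b : Char × Int} (h : pvLt a b = true) : pvLt b a = false := by
  rw [Bool.eq_false_iff]
  intro hba
  rw [pvLt_iff] at h hba
  rcases h with h | ⟨h1, h2⟩ <;> rcases hba with g | ⟨g1, g2⟩
  · exact absurd g (lt_asymm h)
  · exact g1 h
  · exact h1 g
  · omega

theorem pvLt_total {a b : Char × Int} (h : a.2 ≠ b.2) :
    pvLt a b = true ∨ pvLt b a = true := by
  rcases lt_trichotomy a.1 b.1 with hc | hc | hc
  · exact Or.inl ((pvLt_iff a b).mpr (Or.inl hc))
  · rcases lt_or_gt_of_ne h with hi | hi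
    · exact Or.inl ((pvLt_iff a b).mpr (Or.inr ⟨by simp [hc], hi⟩))
    · exact Or.inr ((pvLt_iff b a).mpr (Or.inr ⟨by simp [hc], hi⟩))
  · exact Or.inr ((pvLt_iff b a).mpr (Or.inl hc))

theorem insertBy_eq (x y : Char × Int) (ys : List (Char × Int)) :
    PySem.List.insertBy pvLt x (y :: ys) =
      if pvLt x y = true then x :: y :: ys else y :: PySem.List.insertBy pvLt x ys := by
  rfl

theorem insertBy_pairwise (x : Char × Int) (acc : List (Char × Int))
    (h : acc.Pairwise (fun a b => pvLt a b = true))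
    (ht : ∀ y ∈ acc, pvLt x y = true ∨ pvLt y x = true) :
    (PySem.List.insertBy pvLt x acc).Pairwise (fun a b => pvLt a b = true) := by
  induction acc with
  | nil => simp [PySem.List.insertBy]
  | cons y ys ih =>
    rcases List.pairwise_cons.mp h with ⟨hy, hys⟩
    rw [insertBy_eq]
    by_cases hxy : pvLt x y = true
    · simp only [hxy, if_true]
      refine List.pairwise_cons.mpr ⟨?_, h⟩
      intro z hz
      rcases List.mem_cons.mp hz with rfl | hz
      · exact hxy
      · exact pvLt_trans hxy (hy z hz)
    · simp only [hxy]
      refine List.pairwise_cons.mpr ⟨?_, ih hys (fun z hz => ht z (List.mem_cons_of_mem _ hz))⟩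
      intro z hz
      rcases (PySem.List.mem_insertBy pvLt x z ys).mp hz with rfl | hz
      · rcases ht y List.mem_cons_self with hzy | hzy
        · exact absurd hzy hxy
        · exact hzy
      · exact hy z hz

theorem foldl_insertBy_pairwise (xs : List (Char × Int)) :
    ∀ (acc : List (Char × Int)),
    acc.Pairwise (fun a b => pvLt a b = true) →
    (∀ a ∈ acc, ∀ x ∈ xs, a.2 ≠ x.2) →
    xs.Pairwise (fun a b => a.2 ≠ b.2) →
    (xs.foldl (fun acc x => PySem.List.insertBy pvLt x acc) acc).Pairwise
      (fun a b => pvLt a b = true) := by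
  induction xs with
  | nil => intro acc h _ _; simpa using h
  | cons x xs ih =>
    intro acc h hcross hxs
    rcases List.pairwise_cons.mp hxs with ⟨hx, hxs'⟩
    simp only [List.foldl_cons]
    refine ih _ (insertBy_pairwise x acc h ?_) ?_ hxs'
    · intro y hy
      exact pvLt_total (Ne.symm (hcross y hy x List.mem_cons_self))
    · intro a ha z hz
      rcases (PySem.List.mem_insertBy pvLt x a acc).mp ha with rfl | ha
      · exact hx z hz
      · exact hcross a ha z (List.mem_cons_of_mem _ hz)

theorem sorted2_eq_foldl (xs : List (Char × Int)) :
    PySem.List.sorted2 xs (fun p => p.1) (fun p => p.2) =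
      xs.foldl (fun acc x => PySem.List.insertBy pvLt x acc) [] := rfl

-- rank in a strictly pvLt-sorted list = number of strictly smaller elements
theorem countP_rank (ys : List (Char × Int))
    (h : ys.Pairwise (fun a b => pvLt a b = true)) :
    ∀ (k : Nat) (hk : k < ys.length), ys.countP (fun p => pvLt p ys[k]) = k := by
  induction ys with
  | nil => intro k hk; exact absurd hk (Nat.not_lt_zero k)
  | cons y ys ih =>
    rcases List.pairwise_cons.mp h with ⟨hy, hys⟩
    intro k hk
    cases k with
    | zero =>
      have h0 : List.countP (fun p => pvLt p y) ys = 0 :=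
        List.countP_eq_zero.mpr (fun p hp => by simp [pvLt_asymm (hy p hp)])
      simp [pvLt_irrefl, h0]
    | succ k =>
      have hk' : k < ys.length := by simpa using hk
      have hmem : ys[k] ∈ ys := List.getElem_mem hk'
      simp only [List.getElem_cons_succ, List.countP_cons, hy ys[k] hmem]
      simp [ih hys k hk']

-- the scatter loop, characterised pointwise
theorem foldl_pySetD_getElem? (zs : List (Char × Int)) :
    ∀ (s : Int) (o : List Int) (i : Nat),
    (zs.map (fun z => z.2)).Nodup →
    (∀ z ∈ zs, 0 ≤ z.2) →
    ((PySem.List.enumerate zs s).foldl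
        (fun acc p => PySem.List.pySetD acc p.2.2 (p.1 + 1)) o)[i]? =
      (match PySem.List.index? (zs.map (fun z => z.2)) (i : Int) with
       | some k => if i < o.length then some (s + k + 1) else none
       | none => o[i]?) := by
  induction zs with
  | nil => intro s o i _ _; simp [PySem.List.enumerate_nil, PySem.List.index?]
  | cons z zs ih =>
    intro s o i hnd hnn
    rw [List.map_cons] at hnd
    rcases List.nodup_cons.mp hnd with ⟨hzmem, hnd'⟩
    have hz0 : (0 : Int) ≤ z.2 := hnn z List.mem_cons_self
    have hnn' : ∀ w ∈ zs, (0 : Int) ≤ w.2 := fun w hw => hnn w (List.mem_cons_of_mem _ hw)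
    have hset : PySem.List.pySetD o z.2 (s + 1) = o.set z.2.toNat (s + 1) :=
      PySem.List.pySetD_of_nonneg o (s + 1) hz0
    have hlen : (o.set z.2.toNat (s + 1)).length = o.length := by simp
    rw [PySem.List.enumerate_cons, List.foldl_cons]
    show (List.foldl (fun acc p => PySem.List.pySetD acc p.2.2 (p.1 + 1))
        (PySem.List.pySetD o z.2 (s + 1)) (PySem.List.enumerate zs (s + 1)))[i]? = _
    rw [hset, ih (s + 1) _ i hnd' hnn', List.map_cons]
    by_cases hzi : z.2 = (i : Int)
    · have hzn : (i : Int) ∉ zs.map (fun z => z.2) := by rwa [hzi] at hzmem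
      rw [(PySem.List.index?_eq_none_iff _ _).mpr hzn]
      rw [hzi, PySem.List.index?_cons_self]
      by_cases hilen : i < o.length
      · have htn : ((i : Int)).toNat = i := by omega
        rw [htn]
        simp [hilen]
      · rw [List.set_eq_of_length_le (by omega)]
        simp [hilen]
    · rw [PySem.List.index?_cons_of_ne _ hzi]
      have hget : (o.set z.2.toNat (s + 1))[i]? = o[i]? := List.getElem?_set_ne (by omega)
      rw [hlen, hget]
      cases hidx : PySem.List.index? (zs.map (fun z => z.2)) (i : Int) with
      | none => simp
      | some k =>
        simp only [Option.map_some]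
        by_cases hilen : i < o.length <;> simp [hilen]
        ring

-- pvLt against a fixed pair, rewritten as B's comparison
theorem pvLt_eq_predB (d c : Char) (j i : Int) :
    pvLt (d, j) (c, i) = (decide (d < c) || (d == c && decide (j < i))) := by
  rcases lt_trichotomy d c with h | h | h
  · simp [pvLt, h]
  · simp [pvLt, h]
  · have hne : d ≠ c := ne_of_gt h
    simp [pvLt, h, not_lt_of_gt h, hne]

-- core equality on the processed character list
theorem core_eq (L : List Char) :
    ((PySem.List.enumerate
        (PySem.List.sorted2
          ((PySem.List.pyRange 0 (PySem.List.len L)).map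
            (fun i => (PySem.List.pyGetD L i default, i)))
          (fun p => p.1) (fun p => p.2))).foldl
        (fun acc p => PySem.List.pySetD acc p.2.2 (p.1 + 1))
        (List.replicate L.length (0 : Int))) =
      (PySem.List.enumerate L).map (fun ic =>
        (1 : Int) + ((PySem.List.enumerate L).countP (fun jd =>
          decide (jd.2 < ic.2) || (jd.2 == ic.2 && decide (jd.1 < ic.1))))) := by
  have hI : ((PySem.List.pyRange 0 (PySem.List.len L)).map
      (fun i => (PySem.List.pyGetD L i default, i))) =
      (PySem.List.enumerate L).map Prod.swap := by
    rw [PySem.List.enumerate_eq_map_pyRange L default, List.map_map]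
    rfl
  set I : List (Char × Int) := (PySem.List.enumerate L).map Prod.swap with hIdef
  rw [hI]
  set ys := PySem.List.sorted2 I (fun p => p.1) (fun p => p.2) with hys
  have hperm : ys.Perm I := PySem.List.sorted2_perm I _ _ false
  -- snd-components of I: exactly pyRange 0 |L|, hence nodup
  have hsndI : I.map (fun z => z.2) = PySem.List.pyRange 0 (PySem.List.len L) := by
    rw [hIdef, List.map_map]
    have : ((fun z : Char × Int => z.2) ∘ Prod.swap) = (fun p : Int × Char => p.1) := rfl
    rw [this, PySem.List.map_fst_enumerate]
    simp [PySem.List.len]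
  have hIpw : I.Pairwise (fun a b => a.2 ≠ b.2) := by
    rw [hIdef, List.pairwise_map]
    exact (PySem.List.pairwise_lt_enumerate L 0).imp (fun h => ne_of_lt h)
  have hpw : ys.Pairwise (fun a b => pvLt a b = true) := by
    rw [hys, sorted2_eq_foldl]
    exact foldl_insertBy_pairwise I [] (by simp) (by simp) hIpw
  have hsnd : (ys.map (fun z => z.2)).Perm (PySem.List.pyRange 0 (PySem.List.len L)) := by
    rw [← hsndI]; exact hperm.map _
  have hnd : (ys.map (fun z => z.2)).Nodup :=
    hsnd.nodup_iff.mpr (PySem.List.nodup_pyRange_one 0 _)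
  have hnn : ∀ z ∈ ys, (0 : Int) ≤ z.2 := by
    intro z hz
    have hzI : z ∈ I := hperm.mem_iff.mp hz
    rw [hIdef, List.mem_map] at hzI
    obtain ⟨p, hp, rfl⟩ := hzI
    obtain ⟨k, hk, rfl⟩ := (PySem.List.mem_enumerate_iff L 0 p).mp hp
    simp
  apply List.ext_getElem?
  intro i
  rw [foldl_pySetD_getElem? ys 0 _ i hnd hnn]
  by_cases hi : i < L.length
  · -- i is hit exactly once, by the pair (L[i], i) at its rank
    have hmemI : ((i : Int)) ∈ ys.map (fun z => z.2) := by
      rw [hsnd.mem_iff, PySem.List.mem_pyRange_one]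
      constructor
      · omega
      · simp [PySem.List.len]; omega
    obtain ⟨k, hk⟩ := Option.isSome_iff_exists.mp
      ((PySem.List.index?_isSome_iff _ _).mpr hmemI)
    obtain ⟨hklt, hkval, _⟩ := PySem.List.getElem_of_index?_eq_some hk
    have hkys : k < ys.length := by simpa using hklt
    have hysk2 : ys[k].2 = (i : Int) := by
      rw [List.getElem_map] at hkval; exact hkval
    -- identify ys[k]
    have hyskI : ys[k] ∈ I := hperm.mem_iff.mp (List.getElem_mem hkys)
    have hysk : ys[k] = (L[i], (i : Int)) := by
      rw [hIdef, List.mem_map] at hyskI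
      obtain ⟨p, hp, hpe⟩ := hyskI
      obtain ⟨m, hm, rfl⟩ := (PySem.List.mem_enumerate_iff L 0 p).mp hp
      have h2 : ((m : Int)) = (i : Int) := by
        have := hysk2
        rw [← hpe] at this
        simpa using this
      have hmi : m = i := by exact_mod_cast h2
      subst hmi
      rw [← hpe]
      simp
    -- rank = count of smaller pairs
    have hrank : ys.countP (fun p => pvLt p ys[k]) = k := countP_rank ys hpw k hkys
    have hcount : ys.countP (fun p => pvLt p (L[i], (i : Int))) =
        (PySem.List.enumerate L).countP (fun jd =>
          decide (jd.2 < L[i]) || (jd.2 == L[i] && decide (jd.1 < (i : Int)))) := by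
      rw [hperm.countP_eq, hIdef, List.countP_map]
      apply List.countP_congr
      intro p _
      obtain ⟨j, d⟩ := p
      simp [Prod.swap, pvLt_eq_predB]
    have hkeq : (k : Int) = ((PySem.List.enumerate L).countP (fun jd =>
        decide (jd.2 < L[i]) || (jd.2 == L[i] && decide (jd.1 < (i : Int)))) : Nat) := by
      rw [← hcount, ← hysk, hrank]
    -- both sides at index i
    rw [hk]
    have hilen : i < (List.replicate L.length (0 : Int)).length := by simpa using hi
    have hien : i < (PySem.List.enumerate L 0).length := by
      rw [PySem.List.length_enumerate]; exact hi
    rw [List.getElem?_map, List.getElem?_eq_getElem hien,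
        PySem.List.getElem_enumerate L 0 i hien]
    simp only [hilen, if_true, Option.map_some, Option.some.injEq, zero_add]
    rw [hkeq]
    ring
  · -- out of range on both sides
    have hnmem : ((i : Int)) ∉ ys.map (fun z => z.2) := by
      rw [hsnd.mem_iff, PySem.List.mem_pyRange_one]
      simp [PySem.List.len]
      omega
    rw [(PySem.List.index?_eq_none_iff _ _).mpr hnmem]
    rw [List.getElem?_eq_none (by simpa using not_lt.mp hi),
        List.getElem?_eq_none]
    rw [List.length_map, PySem.List.length_enumerate]
    omega

-- ===== VERDICT (by name: the statement is the Claim_ definition above) =====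
theorem get_key_order_spec : Claim_equal_get_key_order := by
  intro key _
  unfold Spec_get_key_order get_key_order get_key_order_alt
  exact core_eq _
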